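-- pv_equiv track=rewrite | github.com/ohhalim/baekjoonhub | 프로그래머스/0/181864. 문자열 바꿔서 찾기/문자열 바꿔서 찾기.py | solution
-- ===== SOURCE A (Python) =====
-- def solution(myString, pat):
--     transform_myString = ""
--     for char in myString:
--         if char == "A":
--             transform_myString += "B"
--         elif char == "B":
--             transform_myString += "A"
--         else:
--             transform_myString += char
--
--     return 1 if pat in transform_myString else 0
-- ===== SOURCE B (Python) =====
-- def solution(myString, pat):
--     swap = {"A": "B", "B": "A"}
--     n, m = len(myString), len(pat)
--     for i in range(n - m + 1):
--         if all(swap.get(myString[i + j], myString[i + j]) == pat[j] for j in range(m)):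
--             return 1
--     return 0
-- ===== Notes on version B (the rewrite author's own statement) =====
-- stated objective: alternative
-- what changed: B never builds the transformed string: it runs a hand-written window search over the original input, comparing each window position against pat with the A/B swap applied on the fly to the scanned character.
import Mathlib
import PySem

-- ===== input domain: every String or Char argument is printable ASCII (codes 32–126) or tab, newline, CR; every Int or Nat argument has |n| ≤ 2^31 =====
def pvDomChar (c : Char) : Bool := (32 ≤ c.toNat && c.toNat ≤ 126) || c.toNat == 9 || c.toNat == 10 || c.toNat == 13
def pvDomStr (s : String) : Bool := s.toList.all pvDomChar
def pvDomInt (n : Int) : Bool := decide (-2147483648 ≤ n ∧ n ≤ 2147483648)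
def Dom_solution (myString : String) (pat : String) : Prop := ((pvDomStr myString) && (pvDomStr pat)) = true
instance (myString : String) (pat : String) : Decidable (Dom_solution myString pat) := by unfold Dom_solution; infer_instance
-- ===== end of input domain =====

-- B never builds the transformed string: it window-scans the original input, applying the A/B swap on the fly (alternative decomposition).

-- ===== PORT A =====
-- A: build transform_myString char by char (A→B, B→A, else unchanged), then test 'pat in transform_myString'.
def pvStepA (acc : List Char) (c : Char) : List Char :=
  if c == 'A' then acc ++ ['B'] else if c == 'B' then acc ++ ['A'] else acc ++ [c]

def solution (myString : String) (pat : String) : Int :=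
  let transform := myString.toList.foldl pvStepA []
  if PySem.Chars.isIn pat.toList transform then 1 else 0

-- ===== PORT B =====
-- B: swap.get(c, c) with swap = {"A":"B","B":"A"}
def pvSwapB (c : Char) : Char := ((PySem.Dict.empty.insert 'A' 'B').insert 'B' 'A').getD c c

-- window scan: for i in range(n - m + 1): if all(... for j in range(m)): return 1; return 0
-- (i + j is always in bounds, so the getD default is never read)
def solution_alt (myString : String) (pat : String) : Int :=
  let s := myString.toList
  let p := pat.toList
  if (List.range (s.length + 1 - p.length)).any (fun i =>
      (List.range p.length).all (fun j => pvSwapB (s.getD (i + j) ' ') == p.getD j ' '))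
  then 1 else 0

-- ===== PRECONDITION & SPEC =====
def Spec_solution (myString : String) (pat : String) (out : Int) : Prop := out = solution_alt myString pat
instance (myString : String) (pat : String) (out : Int) : Decidable (Spec_solution myString pat out) := by unfold Spec_solution; infer_instance

-- ===== CLAIM =====
def Claim_equal_solution : Prop := ∀ (myString : String) (pat : String), Dom_solution myString pat → Spec_solution myString pat (solution myString pat)

-- ===== LEMMAS AND PROOFS =====
theorem pvSwapB_eq (c : Char) : pvSwapB c = if c = 'A' then 'B' else if c = 'B' then 'A' else c := by
  unfold pvSwapB
  by_cases hA : c = 'A'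
  · simp [hA, PySem.Dict.getD, PySem.Dict.get?, PySem.Dict.insert, PySem.Dict.empty]
  · by_cases hB : c = 'B'
    · simp [hB, PySem.Dict.getD, PySem.Dict.get?, PySem.Dict.insert, PySem.Dict.empty,
        List.find?]
    · have h1 : ('A' == c) = false := by simp [Ne.symm hA]
      have h2 : ('B' == c) = false := by simp [Ne.symm hB]
      simp [hA, hB, h1, h2, PySem.Dict.getD, PySem.Dict.get?, PySem.Dict.insert,
        PySem.Dict.empty, List.find?]

theorem pvStepA_map (l : List Char) (acc : List Char) :
    l.foldl pvStepA acc = acc ++ l.map pvSwapB := by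
  induction l generalizing acc with
  | nil => simp
  | cons c t ih =>
      simp only [List.foldl_cons, List.map_cons, ih]
      unfold pvStepA
      rw [pvSwapB_eq]
      by_cases hA : c = 'A' <;> by_cases hB : c = 'B' <;> simp_all

theorem getD_map_swap (s : List Char) (k : Nat) :
    pvSwapB (s.getD k ' ') = (s.map pvSwapB).getD k ' ' := by
  by_cases h : k < s.length
  · rw [List.getD_eq_getElem _ _ h, List.getD_eq_getElem _ _ (by simpa using h)]
    simp
  · rw [List.getD_eq_default _ _ (by omega), List.getD_eq_default _ _ (by simpa using (by omega : ¬ k < s.length))]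
    rw [pvSwapB_eq]; simp [Char.ext_iff]

theorem window_iff_infix (p t : List Char) :
    ((List.range (t.length + 1 - p.length)).any (fun i =>
      (List.range p.length).all (fun j => t.getD (i + j) ' ' == p.getD j ' ')) = true)
    ↔ p <:+: t := by
  simp only [List.any_eq_true, List.mem_range, List.all_eq_true, beq_iff_eq]
  constructor
  · rintro ⟨i, hi, hall⟩
    have hle : i + p.length ≤ t.length := by omega
    have : p = (t.drop i).take p.length := by
      apply List.ext_getElem
      · simp; omega
      · intro j hj hj'
        have hjp : j < p.length := hj
        have := hall j hjp
        rw [List.getD_eq_getElem _ _ (by omega), List.getD_eq_getElem _ _ hjp] at this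
        simp only [List.getElem_take, List.getElem_drop]
        exact this.symm
    rw [this]
    exact ((List.take_prefix p.length (t.drop i)).isInfix).trans (List.drop_suffix i t).isInfix
  · rintro ⟨pre, suf, h⟩
    subst h
    refine ⟨pre.length, by simp; omega, ?_⟩
    intro j hj
    have hlen : pre.length + j < (pre ++ p ++ suf).length := by simp; omega
    rw [List.getD_eq_getElem _ _ hlen, List.getD_eq_getElem _ _ hj]
    rw [List.getElem_append_left (show pre.length + j < (pre ++ p).length by simp; omega),
        List.getElem_append_right (show pre.length ≤ pre.length + j by omega)]
    congr 1
    omega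

-- ===== VERDICT =====
theorem solution_spec : Claim_equal_solution := by
  intro myString pat _
  unfold Spec_solution solution solution_alt
  simp only [pvStepA_map, List.nil_append, getD_map_swap]
  by_cases h : pat.toList <:+: myString.toList.map pvSwapB
  · rw [if_pos ((PySem.Chars.isIn_iff_infix _ _).mpr h),
        if_pos (by simpa using (window_iff_infix pat.toList (myString.toList.map pvSwapB)).mpr h)]
  · rw [if_neg (fun hc => h ((PySem.Chars.isIn_iff_infix _ _).mp hc)),
        if_neg (fun hc => h ((window_iff_infix pat.toList (myString.toList.map pvSwapB)).mp (by simpa using hc)))]
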